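-- pv_equiv track=rewrite | github.com/AbhijitPisal1/robotframework-python-projects | python-learning/02_coding-exercises/remove_duplicates_variations.py | remove_duplicates_from_number
-- ===== SOURCE A (Python) =====
-- def remove_duplicates_from_number(num):
--     digits = list(str(num))
--     seen = set()
--     result = []
--     for d in digits:
--         if d not in seen:
--             seen.add(d)
--             result.append(d)
--     return int(''.join(result))
-- ===== SOURCE B (Python) =====
-- def remove_duplicates_from_number(num):
--     def dedup(chars):
--         if not chars:
--             return []
--         head = chars[0]
--         return [head] + dedup([c for c in chars[1:] if c != head])
--     return int(''.join(dedup(list(str(num)))))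
-- ===== Notes on version B (the rewrite author's own statement) =====
-- stated objective: alternative
-- what changed: Replaces A's single pass with a seen-set accumulator by a recursion with no auxiliary state: keep the head character and recurse on the tail with every later occurrence of the head filtered out, then join and convert.
import Mathlib
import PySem

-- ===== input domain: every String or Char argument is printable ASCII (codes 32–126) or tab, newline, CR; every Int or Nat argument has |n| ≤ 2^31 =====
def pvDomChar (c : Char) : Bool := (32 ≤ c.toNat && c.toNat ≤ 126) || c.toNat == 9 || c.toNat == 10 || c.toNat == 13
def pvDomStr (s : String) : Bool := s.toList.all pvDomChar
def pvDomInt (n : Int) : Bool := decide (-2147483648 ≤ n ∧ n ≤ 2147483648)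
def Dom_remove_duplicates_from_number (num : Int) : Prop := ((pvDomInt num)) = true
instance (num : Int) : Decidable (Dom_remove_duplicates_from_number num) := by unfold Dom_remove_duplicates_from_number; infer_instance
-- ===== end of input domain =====

-- B replaces A's seen-set single pass by a stateless recursion (keep head, filter it out of the tail, recurse); alternative decomposition, not faster.

-- ===== PORT A =====
-- int(''.join(result)) never raises here (the dedup of str(num) is itself a valid int literal), so the getD 0 branch is dead.
def remove_duplicates_from_number (num : Int) : Int :=
  let digits := PySem.Int.toChars num
  let st := digits.foldl
    (fun (st : PySem.Set Char × List Char) d =>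
      if PySem.Set.contains st.1 d then st
      else (PySem.Set.add st.1 d, st.2 ++ [d]))
    (PySem.Set.empty, [])
  (PySem.Int.ofChars? st.2).getD 0

-- ===== PORT B =====
-- Source B's inner 'dedup': head of the list followed by dedup of the tail with the head filtered out.
def pvDedupB : List Char → List Char
  | [] => []
  | c :: t => c :: pvDedupB (t.filter (fun d => d != c))
termination_by l => l.length
decreasing_by simpa using Nat.lt_succ_of_le (List.length_filter_le _ t)

def remove_duplicates_from_number_alt (num : Int) : Int :=
  (PySem.Int.ofChars? (pvDedupB (PySem.Int.toChars num))).getD 0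

-- ===== PRECONDITION & SPEC =====
def Spec_remove_duplicates_from_number (num : Int) (out : Int) : Prop := out = remove_duplicates_from_number_alt num
instance (num : Int) (out : Int) : Decidable (Spec_remove_duplicates_from_number num out) := by unfold Spec_remove_duplicates_from_number; infer_instance

-- ===== CLAIM (what is proved, stated in full; the proofs are below) =====
def Claim_equal_remove_duplicates_from_number : Prop := ∀ (num : Int), Dom_remove_duplicates_from_number num → Spec_remove_duplicates_from_number num (remove_duplicates_from_number num)

-- ===== LEMMAS AND PROOFS =====

-- A's foldl, started with seen set S and accumulator acc, produces acc followed by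
-- B's recursive dedup of the input with the already-seen characters filtered away.
lemma pv_main (l : List Char) : ∀ (S : PySem.Set Char) (acc : List Char),
    (l.foldl
      (fun (st : PySem.Set Char × List Char) d =>
        if PySem.Set.contains st.1 d then st
        else (PySem.Set.add st.1 d, st.2 ++ [d]))
      (S, acc)).2
    = acc ++ pvDedupB (l.filter (fun d => !(PySem.Set.contains S d))) := by
  induction l with
  | nil => intro S acc; simp only [List.foldl_nil, List.filter_nil, pvDedupB, List.append_nil]
  | cons c t ih =>
    intro S acc
    rw [List.foldl_cons, List.filter_cons]
    by_cases hc : PySem.Set.contains S c = true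
    · rw [if_pos hc, hc]
      simpa using ih S acc
    · have hc' : PySem.Set.contains S c = false := by
        cases h : PySem.Set.contains S c
        · rfl
        · exact absurd h hc
      rw [if_neg hc, hc']
      simp only [Bool.not_false]
      rw [ih (PySem.Set.add S c) (acc ++ [c])]
      conv_rhs => rw [pvDedupB.eq_def]
      have hfilt : t.filter (fun d => !(PySem.Set.contains (PySem.Set.add S c) d))
          = (t.filter (fun d => !(PySem.Set.contains S d))).filter (fun d => d != c) := by
        rw [List.filter_filter]
        apply List.filter_congr
        intro d _
        have hcS : c ∉ S := by simpa [PySem.Set.contains] using hc'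
        by_cases hdc : d = c
        · subst hdc; simp [PySem.Set.add, PySem.Set.contains, hcS]
        · simp [PySem.Set.add, PySem.Set.contains, hcS, hdc]
      rw [hfilt]
      simp

-- ===== VERDICT (by name: the statement is the Claim_ definition above) =====
theorem remove_duplicates_from_number_spec : Claim_equal_remove_duplicates_from_number := by
  intro num _
  unfold Spec_remove_duplicates_from_number
  unfold remove_duplicates_from_number remove_duplicates_from_number_alt
  have h := pv_main (PySem.Int.toChars num) PySem.Set.empty []
  simp only [List.nil_append] at h
  have hf : (PySem.Int.toChars num).filter (fun d => !(PySem.Set.contains PySem.Set.empty d))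
      = PySem.Int.toChars num := by
    apply List.filter_eq_self.mpr
    intro a _
    simp [PySem.Set.contains, PySem.Set.empty]
  rw [hf] at h
  exact congrArg (fun cs => (PySem.Int.ofChars? cs).getD 0) h
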